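-- pv_equiv track=rewrite | github.com/KiwiDot/programmers | 코딩테스트 연습/코딩테스트 입문/옹알이 (1)/옹알이 (1).py | solution
-- ===== SOURCE A (Python) =====
-- def solution(babbling):
--     answer = 0
--     word = ["aya", "ye", "woo", "ma"]
--
--     for i in babbling:
--         for j in word:
--             i = i.replace(j, '-')
--
--         if set(i) == {'-'}:
--             answer += 1
--
--     return answer
-- ===== SOURCE B (Python) =====
-- def _valid(s):
--     if not s:
--         return False
--     i, n = 0, len(s)
--     while i < n:
--         if s.startswith("aya", i):
--             i += 3
--         elif s.startswith("ye", i):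
--             i += 2
--         elif s.startswith("woo", i):
--             i += 3
--         elif s.startswith("ma", i):
--             i += 2
--         elif s[i] == '-':
--             i += 1
--         else:
--             return False
--     return True
--
--
-- def solution(babbling):
--     return sum(1 for s in babbling if _valid(s))
-- ===== Notes on version B (the rewrite author's own statement) =====
-- stated objective: alternative
-- what changed: A runs four sequential str.replace passes over each string and then compares the character set with {'-'}; B decides each string in a single left-to-right scan that greedily consumes the tokens aya/ye/woo/ma and literal '-'.
import Mathlib
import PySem

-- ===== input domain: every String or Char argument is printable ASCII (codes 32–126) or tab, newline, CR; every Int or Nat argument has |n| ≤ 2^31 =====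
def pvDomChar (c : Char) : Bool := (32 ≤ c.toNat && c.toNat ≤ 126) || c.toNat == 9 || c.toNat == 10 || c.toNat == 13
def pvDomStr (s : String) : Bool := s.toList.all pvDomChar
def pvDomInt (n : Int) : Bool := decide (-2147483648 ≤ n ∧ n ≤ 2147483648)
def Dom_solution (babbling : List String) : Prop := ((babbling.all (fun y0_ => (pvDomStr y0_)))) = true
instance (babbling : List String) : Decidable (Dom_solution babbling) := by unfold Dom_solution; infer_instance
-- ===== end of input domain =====

-- B replaces A's four sequential str.replace passes + set comparison per string by a single
-- left-to-right token scan (tokens aya/ye/woo/ma/'-'); same return value, one pass per string.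

-- ===== PORT A =====
def solution (babbling : List String) : Int :=
  babbling.foldl (fun answer i0 =>
    let i := List.foldl (fun i j => PySem.Str.replace i j "-") i0 ["aya", "ye", "woo", "ma"]
    if PySem.Set.equal (PySem.Set.ofList i.toList) (PySem.Set.ofList ['-']) then answer + 1
    else answer) 0

-- ===== PORT B =====
-- Source B's while-loop scanner: consume one token at the current position or fail
-- (i += 3 on the list c :: t is t.drop 2, etc.)
def okScan : List Char → Bool
  | [] => true
  | c :: t =>
    if ['a','y','a'].isPrefixOf (c :: t) then okScan (t.drop 2)
    else if ['y','e'].isPrefixOf (c :: t) then okScan (t.drop 1)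
    else if ['w','o','o'].isPrefixOf (c :: t) then okScan (t.drop 2)
    else if ['m','a'].isPrefixOf (c :: t) then okScan (t.drop 1)
    else if c = '-' then okScan t
    else false
termination_by l => l.length
decreasing_by all_goals (simp [List.length_drop]; try omega)

def solution_alt (babbling : List String) : Int :=
  (babbling.countP (fun s => !s.toList.isEmpty && okScan s.toList) : Int)

-- ===== PRECONDITION & SPEC =====
def Spec_solution (babbling : List String) (out : Int) : Prop := out = solution_alt babbling
instance (babbling : List String) (out : Int) : Decidable (Spec_solution babbling out) := by unfold Spec_solution; infer_instance

-- ===== CLAIM (what is proved, stated in full; the proofs are below) =====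
def Claim_equal_solution : Prop := ∀ (babbling : List String), Dom_solution babbling → Spec_solution babbling (solution babbling)

-- ===== LEMMAS AND PROOFS =====

-- Clean recursion equal to PySem.Chars.replace with a nonempty pattern and replacement "-".
def rep (w : List Char) : List Char → List Char
  | [] => []
  | c :: t =>
    if w.isPrefixOf (c :: t) then '-' :: rep w (t.drop (w.length - 1)) else c :: rep w t
termination_by l => l.length
decreasing_by all_goals (simp [List.length_drop]; try omega)

theorem rep_nil (w : List Char) : rep w [] = [] := by simp [rep]

theorem rep_cons_pos (w c t) (h : w.isPrefixOf (c :: t) = true) :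
    rep w (c :: t) = '-' :: rep w (t.drop (w.length - 1)) := by
  rw [rep, if_pos h]

theorem rep_cons_neg (w c t) (h : w.isPrefixOf (c :: t) = false) :
    rep w (c :: t) = c :: rep w t := by
  rw [rep, if_neg (by simp [h])]

theorem bool_eq_false {b : Bool} (h : ¬ b = true) : b = false := by
  cases b
  · rfl
  · exact absurd rfl h

theorem go_eq (w : List Char) (hw : w ≠ []) :
    ∀ (fuel : Nat) (l acc : List Char), l.length ≤ fuel →
      PySem.Chars.replace.go w ['-'] fuel l acc = acc.reverse ++ rep w l := by
  intro fuel
  induction fuel with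
  | zero =>
    intro l acc h
    have hl : l = [] := by cases l <;> simp_all
    subst hl
    rw [PySem.Chars.replace.go.eq_def]
    simp [rep_nil]
  | succ n ih =>
    intro l acc h
    rw [PySem.Chars.replace.go.eq_def]
    cases l with
    | nil => simp [rep_nil]
    | cons c t =>
      simp only []
      by_cases hp : w.isPrefixOf (c :: t) = true
      · rw [if_pos hp]
        obtain ⟨d, w', rfl⟩ : ∃ d w', w = d :: w' := by
          cases w with
          | nil => exact absurd rfl hw
          | cons d w' => exact ⟨d, w', rfl⟩
        have hdrop : (c :: t).drop (d :: w').length = t.drop ((d :: w').length - 1) := by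
          simp
        rw [hdrop, ih _ _ (by simp at h ⊢; omega)]
        rw [rep_cons_pos _ _ _ hp]
        simp
      · rw [if_neg hp]
        rw [ih _ _ (by simp at h ⊢; omega)]
        rw [rep_cons_neg _ _ _ (bool_eq_false hp)]
        simp

theorem replace_eq_rep (l w : List Char) (hw : w ≠ []) :
    PySem.Chars.replace l w ['-'] = rep w l := by
  rw [PySem.Chars.replace, if_neg (by simp [hw])]
  simpa using go_eq w hw l.length l [] le_rfl

theorem rep_eq_nil_iff (w : List Char) (l : List Char) : rep w l = [] ↔ l = [] := by
  cases l with
  | nil => simp [rep_nil]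
  | cons c t =>
    rw [rep]
    constructor
    · intro h; split at h <;> simp_all
    · intro h; simp_all

-- If a pattern with no '-' is a prefix of the replaced string, it was a prefix before.
theorem prefix_back (w : List Char) :
    ∀ (x p : List Char), '-' ∉ p → p.isPrefixOf (rep w x) = true → p.isPrefixOf x = true := by
  intro x
  induction x with
  | nil => intro p hd h; simpa [rep_nil] using h
  | cons c t ih =>
    intro p hd h
    by_cases hp : w.isPrefixOf (c :: t) = true
    · rw [rep_cons_pos _ _ _ hp] at h
      cases p with
      | nil => simp
      | cons q p' =>
        simp only [List.isPrefixOf] at h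
        have : q = '-' := by
          rcases Bool.and_eq_true_iff.mp h with ⟨h1, _⟩
          exact (beq_iff_eq.mp h1)
        exact absurd (this ▸ List.mem_cons_self) hd
    · rw [rep_cons_neg _ _ _ (bool_eq_false hp)] at h
      cases p with
      | nil => simp
      | cons q p' =>
        simp only [List.isPrefixOf] at h ⊢
        rcases Bool.and_eq_true_iff.mp h with ⟨h1, h2⟩
        refine Bool.and_eq_true_iff.mpr ⟨h1, ?_⟩
        exact ih p' (fun hm => hd (List.mem_cons_of_mem _ hm)) h2

theorem pfx_cons (a : Char) (l : List Char) (b : Char) (t : List Char) :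
    (a :: l).isPrefixOf (b :: t) = ((a == b) && l.isPrefixOf t) := rfl

theorem pfx_ne (a : Char) (l : List Char) (b : Char) (t : List Char) (h : (a == b) = false) :
    (a :: l).isPrefixOf (b :: t) = false := by rw [pfx_cons, h, Bool.false_and]

theorem setEq_dash (xs : List Char) :
    PySem.Set.equal (PySem.Set.ofList xs) (PySem.Set.ofList ['-'])
      = (!xs.isEmpty && xs.all (fun c => c == '-')) := by
  rw [Bool.eq_iff_iff, PySem.Set.equal_iff]
  constructor
  · intro h
    have hmem : ∀ x, x ∈ xs ↔ x = '-' := by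
      intro x; have h2 := h x; simpa [PySem.Set.mem_ofList] using h2
    cases xs with
    | nil => exact absurd ((hmem '-').mpr rfl) (by simp)
    | cons a rest =>
      simp only [List.isEmpty_cons, Bool.not_false, Bool.true_and, List.all_eq_true, beq_iff_eq]
      exact fun x hx => (hmem x).mp hx
  · intro h x
    rcases Bool.and_eq_true_iff.mp h with ⟨h1, h2⟩
    have hall : ∀ c ∈ xs, c = '-' := by
      intro c hc
      have := List.all_eq_true.mp h2 c hc
      exact beq_iff_eq.mp this
    simp only [PySem.Set.mem_ofList, List.mem_singleton]
    constructor
    · exact fun hx => hall x hx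
    · intro hx
      cases xs with
      | nil => simp at h1
      | cons a rest =>
        have : a = '-' := hall a List.mem_cons_self
        rw [hx, ← this]; exact List.mem_cons_self

theorem rep_isEmpty (w : List Char) (x : List Char) : (rep w x).isEmpty = x.isEmpty := by
  cases x with
  | nil => simp [rep_nil]
  | cons c t =>
    rcases hE : rep w (c :: t) with _ | ⟨d, u⟩
    · exact absurd ((rep_eq_nil_iff w (c :: t)).mp hE) (by simp)
    · simp

theorem rep_ma_woo_dash (x : List Char) :
    rep ['m','a'] (rep ['w','o','o'] ('-' :: x)) = '-' :: rep ['m','a'] (rep ['w','o','o'] x) := by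
  rw [rep_cons_neg ['w','o','o'] '-' x (pfx_ne 'w' ['o','o'] '-' x (by decide)),
      rep_cons_neg ['m','a'] '-' (rep ['w','o','o'] x) (pfx_ne 'm' ['a'] '-' _ (by decide))]

theorem rep_chain3_dash (x : List Char) :
    rep ['m','a'] (rep ['w','o','o'] (rep ['y','e'] ('-' :: x)))
      = '-' :: rep ['m','a'] (rep ['w','o','o'] (rep ['y','e'] x)) := by
  rw [rep_cons_neg ['y','e'] '-' x (pfx_ne 'y' ['e'] '-' x (by decide))]
  exact rep_ma_woo_dash _

-- the heart: four sequential replaces leave only dashes  ⟺  the one-pass scanner accepts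
theorem chainAll (l : List Char) :
    (rep ['m','a'] (rep ['w','o','o'] (rep ['y','e'] (rep ['a','y','a'] l)))).all (fun c => c == '-')
      = okScan l := by
  fun_induction okScan l with
  | case1 => simp [rep_nil]
  | case2 c t h ih =>
    obtain ⟨r, hr⟩ := List.isPrefixOf_iff_prefix.mp h
    simp only [List.cons_append, List.nil_append] at hr
    injection hr with ha hb; subst ha; subst hb
    rw [rep_cons_pos ['a','y','a'] 'a' ('y'::'a'::r) h]
    have hd : ('y'::'a'::r).drop (['a','y','a'].length - 1) = r := by simp
    rw [hd, rep_chain3_dash]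
    simpa using ih
  | case3 c t h1 h2 ih =>
    obtain ⟨r, hr⟩ := List.isPrefixOf_iff_prefix.mp h2
    simp only [List.cons_append, List.nil_append] at hr
    injection hr with ha hb; subst ha; subst hb
    rw [rep_cons_neg ['a','y','a'] 'y' ('e'::r) (pfx_ne 'a' ['y','a'] 'y' _ (by decide)),
        rep_cons_neg ['a','y','a'] 'e' r (pfx_ne 'a' ['y','a'] 'e' _ (by decide)),
        rep_cons_pos ['y','e'] 'y' ('e' :: rep ['a','y','a'] r) (by simp)]
    have hd : ('e' :: rep ['a','y','a'] r).drop (['y','e'].length - 1) = rep ['a','y','a'] r := by simp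
    rw [hd, rep_ma_woo_dash]
    simpa using ih
  | case4 c t h1 h2 h3 ih =>
    obtain ⟨r, hr⟩ := List.isPrefixOf_iff_prefix.mp h3
    simp only [List.cons_append, List.nil_append] at hr
    injection hr with ha hb; subst ha; subst hb
    rw [rep_cons_neg ['a','y','a'] 'w' ('o'::'o'::r) (pfx_ne 'a' ['y','a'] 'w' _ (by decide)),
        rep_cons_neg ['a','y','a'] 'o' ('o'::r) (pfx_ne 'a' ['y','a'] 'o' _ (by decide)),
        rep_cons_neg ['a','y','a'] 'o' r (pfx_ne 'a' ['y','a'] 'o' _ (by decide)),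
        rep_cons_neg ['y','e'] 'w' ('o'::'o'::rep ['a','y','a'] r) (pfx_ne 'y' ['e'] 'w' _ (by decide)),
        rep_cons_neg ['y','e'] 'o' ('o'::rep ['a','y','a'] r) (pfx_ne 'y' ['e'] 'o' _ (by decide)),
        rep_cons_neg ['y','e'] 'o' (rep ['a','y','a'] r) (pfx_ne 'y' ['e'] 'o' _ (by decide)),
        rep_cons_pos ['w','o','o'] 'w' ('o'::'o'::rep ['y','e'] (rep ['a','y','a'] r)) (by simp)]
    have hd : ('o'::'o'::rep ['y','e'] (rep ['a','y','a'] r)).drop (['w','o','o'].length - 1)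
        = rep ['y','e'] (rep ['a','y','a'] r) := by simp
    rw [hd, rep_cons_neg ['m','a'] '-' (rep ['w','o','o'] (rep ['y','e'] (rep ['a','y','a'] r)))
          (pfx_ne 'm' ['a'] '-' _ (by decide))]
    simpa using ih
  | case5 c t h1 h2 h3 h4 ih =>
    obtain ⟨r, hr⟩ := List.isPrefixOf_iff_prefix.mp h4
    simp only [List.cons_append, List.nil_append] at hr
    injection hr with ha hb; subst ha; subst hb
    by_cases hp : ['a','y','a'].isPrefixOf ('a' :: r) = true
    · obtain ⟨r2, hr2⟩ := List.isPrefixOf_iff_prefix.mp hp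
      simp only [List.cons_append, List.nil_append] at hr2
      injection hr2 with ha2 hb2; subst hb2
      rw [rep_cons_neg ['a','y','a'] 'm' ('a'::'y'::'a'::r2) (pfx_ne 'a' ['y','a'] 'm' _ (by decide)),
          rep_cons_pos ['a','y','a'] 'a' ('y'::'a'::r2) hp]
      have hd : ('y'::'a'::r2).drop (['a','y','a'].length - 1) = r2 := by simp
      rw [hd,
          rep_cons_neg ['y','e'] 'm' ('-' :: rep ['a','y','a'] r2) (pfx_ne 'y' ['e'] 'm' _ (by decide)),
          rep_cons_neg ['y','e'] '-' (rep ['a','y','a'] r2) (pfx_ne 'y' ['e'] '-' _ (by decide)),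
          rep_cons_neg ['w','o','o'] 'm' ('-' :: rep ['y','e'] (rep ['a','y','a'] r2)) (pfx_ne 'w' ['o','o'] 'm' _ (by decide)),
          rep_cons_neg ['w','o','o'] '-' (rep ['y','e'] (rep ['a','y','a'] r2)) (pfx_ne 'w' ['o','o'] '-' _ (by decide)),
          rep_cons_neg ['m','a'] 'm' ('-' :: rep ['w','o','o'] (rep ['y','e'] (rep ['a','y','a'] r2)))
            (by rw [pfx_cons, pfx_ne 'a' [] '-' (rep ['w','o','o'] (rep ['y','e'] (rep ['a','y','a'] r2))) (by decide)]; simp)]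
      simp [okScan, pfx_cons]
    · rw [rep_cons_neg ['a','y','a'] 'm' ('a'::r) (pfx_ne 'a' ['y','a'] 'm' _ (by decide)),
          rep_cons_neg ['a','y','a'] 'a' r (bool_eq_false hp),
          rep_cons_neg ['y','e'] 'm' ('a' :: rep ['a','y','a'] r) (pfx_ne 'y' ['e'] 'm' _ (by decide)),
          rep_cons_neg ['y','e'] 'a' (rep ['a','y','a'] r) (pfx_ne 'y' ['e'] 'a' _ (by decide)),
          rep_cons_neg ['w','o','o'] 'm' ('a' :: rep ['y','e'] (rep ['a','y','a'] r)) (pfx_ne 'w' ['o','o'] 'm' _ (by decide)),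
          rep_cons_neg ['w','o','o'] 'a' (rep ['y','e'] (rep ['a','y','a'] r)) (pfx_ne 'w' ['o','o'] 'a' _ (by decide)),
          rep_cons_pos ['m','a'] 'm' ('a' :: rep ['w','o','o'] (rep ['y','e'] (rep ['a','y','a'] r))) (by simp)]
      have hd : ('a' :: rep ['w','o','o'] (rep ['y','e'] (rep ['a','y','a'] r))).drop (['m','a'].length - 1)
          = rep ['w','o','o'] (rep ['y','e'] (rep ['a','y','a'] r)) := by simp
      rw [hd]
      simpa using ih
  | case6 t h1 h2 h3 h4 ih =>
    rw [rep_cons_neg ['a','y','a'] '-' t (pfx_ne 'a' ['y','a'] '-' _ (by decide)),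
        rep_chain3_dash]
    simpa using ih
  | case7 c t h1 h2 h3 h4 h5 =>
    have e1 : rep ['a','y','a'] (c :: t) = c :: rep ['a','y','a'] t :=
      rep_cons_neg _ _ _ (bool_eq_false h1)
    have e2 : rep ['y','e'] (c :: rep ['a','y','a'] t) = c :: rep ['y','e'] (rep ['a','y','a'] t) := by
      apply rep_cons_neg
      by_cases hc : c = 'y'
      · subst hc
        cases hE : ['e'].isPrefixOf (rep ['a','y','a'] t)
        · rw [pfx_cons, hE]; simp
        · exfalso
          apply h2
          have het : ['e'].isPrefixOf t = true :=
            prefix_back ['a','y','a'] t ['e'] (by decide) hE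
          rw [pfx_cons, het]; simp
      · exact pfx_ne _ _ _ _ (beq_eq_false_iff_ne.mpr fun he => hc he.symm)
    have e3 : rep ['w','o','o'] (c :: rep ['y','e'] (rep ['a','y','a'] t))
        = c :: rep ['w','o','o'] (rep ['y','e'] (rep ['a','y','a'] t)) := by
      apply rep_cons_neg
      by_cases hc : c = 'w'
      · subst hc
        cases hE : ['o','o'].isPrefixOf (rep ['y','e'] (rep ['a','y','a'] t))
        · rw [pfx_cons, hE]; simp
        · exfalso
          apply h3
          have het : ['o','o'].isPrefixOf t = true :=
            prefix_back ['a','y','a'] t ['o','o'] (by decide)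
              (prefix_back ['y','e'] (rep ['a','y','a'] t) ['o','o'] (by decide) hE)
          rw [pfx_cons, het]; simp
      · exact pfx_ne _ _ _ _ (beq_eq_false_iff_ne.mpr fun he => hc he.symm)
    have e4 : rep ['m','a'] (c :: rep ['w','o','o'] (rep ['y','e'] (rep ['a','y','a'] t)))
        = c :: rep ['m','a'] (rep ['w','o','o'] (rep ['y','e'] (rep ['a','y','a'] t))) := by
      apply rep_cons_neg
      by_cases hc : c = 'm'
      · subst hc
        cases hE : ['a'].isPrefixOf (rep ['w','o','o'] (rep ['y','e'] (rep ['a','y','a'] t)))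
        · rw [pfx_cons, hE]; simp
        · exfalso
          apply h4
          have het : ['a'].isPrefixOf t = true :=
            prefix_back ['a','y','a'] t ['a'] (by decide)
              (prefix_back ['y','e'] (rep ['a','y','a'] t) ['a'] (by decide)
                (prefix_back ['w','o','o'] (rep ['y','e'] (rep ['a','y','a'] t)) ['a'] (by decide) hE))
          rw [pfx_cons, het]; simp
      · exact pfx_ne _ _ _ _ (beq_eq_false_iff_ne.mpr fun he => hc he.symm)
    rw [e1, e2, e3, e4]
    simp [beq_eq_false_iff_ne.mpr h5]

theorem perString (s : String) :
    PySem.Set.equal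
      (PySem.Set.ofList (List.foldl (fun i j => PySem.Str.replace i j "-") s ["aya", "ye", "woo", "ma"]).toList)
      (PySem.Set.ofList ['-'])
      = (!s.toList.isEmpty && okScan s.toList) := by
  have haya : ("aya" : String).toList = ['a','y','a'] := rfl
  have hye : ("ye" : String).toList = ['y','e'] := rfl
  have hwoo : ("woo" : String).toList = ['w','o','o'] := rfl
  have hma : ("ma" : String).toList = ['m','a'] := rfl
  have hdash : ("-" : String).toList = ['-'] := rfl
  simp only [List.foldl_cons, List.foldl_nil, PySem.Str.toList_replace, haya, hye, hwoo, hma, hdash]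
  rw [replace_eq_rep _ _ (by decide), replace_eq_rep _ _ (by decide),
      replace_eq_rep _ _ (by decide), replace_eq_rep _ _ (by decide)]
  rw [setEq_dash, rep_isEmpty, rep_isEmpty, rep_isEmpty, rep_isEmpty, chainAll]

-- ===== VERDICT (by name: the statement is the Claim_ definition above) =====
theorem solution_spec : Claim_equal_solution := by
  intro babbling _
  unfold Spec_solution solution solution_alt
  rw [PySem.List.foldl_if_add_one]
  have hc := List.countP_congr (l := babbling) (p := fun i0 =>
      PySem.Set.equal
        (PySem.Set.ofList (List.foldl (fun i j => PySem.Str.replace i j "-") i0 ["aya", "ye", "woo", "ma"]).toList)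
        (PySem.Set.ofList ['-']))
    (q := fun s => !s.toList.isEmpty && okScan s.toList)
    (fun s _ => iff_of_eq (congrArg (· = true) (perString s)))
  rw [hc]
  simp
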